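-- pv_equiv track=rewrite | github.com/nel-eleven11/Generador_Analizador_Lexico | readYalex.py | transform_brackets
-- ===== SOURCE A (Python) =====
-- def parse_bracket(expr, i):
--     """
--     Dado que en expr[i] se encuentra un '[', se procesa el grupo hasta el correspondiente ']'
--     y se transforma en una agrupación con alternancia.
--     Se extraen los tokens (entre comillas) y se detectan rangos (p.ej., '0'-'9').
--     Soporta grupos anidados.
--
--     Retorna una tupla (transformed, nuevo_indice)
--     """
--     alternatives = []
--     i += 1  # saltar '['
--     while i < len(expr) and expr[i] != ']':
--         if expr[i].isspace():
--             i += 1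
--             continue
--         # Procesar token entre comillas
--         if expr[i] in ["'", '"']:
--             quote = expr[i]
--             i += 1
--             token_val = ""
--             while i < len(expr) and expr[i] != quote:
--                 token_val += expr[i]
--                 i += 1
--             i += 1  # saltar comilla de cierre
--             # Si es doble comilla, se toman cada uno de sus caracteres por separado
--             if quote == '"':
--                 for ch in token_val:
--                     alternatives.append(ch)
--             else:
--                 alternatives.append(token_val)
--             # Verificar si se define un rango (por ejemplo, '0'-'9')
--             if i < len(expr) and expr[i] == '-':
--                 i += 1  # saltar '-'
--                 if i < len(expr) and expr[i] in ["'", '"']: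
--                     quote2 = expr[i]
--                     i += 1
--                     token_val2 = ""
--                     while i < len(expr) and expr[i] != quote2:
--                         token_val2 += expr[i]
--                         i += 1
--                     i += 1  # saltar comilla de cierre
--                     if len(token_val) == 1 and len(token_val2) == 1:
--                         # Se elimina el token anterior y se expande el rango
--                         alternatives.pop()
--                         for c in range(ord(token_val), ord(token_val2) + 1):
--                             alternatives.append(chr(c))
--                     # Si no son de un solo carácter, se puede definir otro comportamiento
--                 else:
--                     alternatives.append('-')
--         elif expr[i] == '[':
--             # Grupo anidado: se procesa recursivamente.
--             nested_trans, i = parse_bracket(expr, i)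
--             alternatives.append(nested_trans)
--         else:
--             # Cualquier otro carácter se agrega tal cual.
--             alternatives.append(expr[i])
--             i += 1
--     if i < len(expr) and expr[i] == ']':
--         i += 1  # saltar ']'
--     transformed = "(" + "|".join(alternatives) + ")"
--     return transformed, i
--
-- def transform_brackets(expr):
--     """
--     Procesa la expresión expr y reemplaza cada grupo entre corchetes [ ... ]
--     por una agrupación con alternancia, aplicando recursividad para grupos anidados.
--     """
--     result = ""
--     i = 0
--     while i < len(expr):
--         if (expr[i] == '[') and (expr[i-1] != '\\'):
--             trans, i = parse_bracket(expr, i)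
--             result += trans
--         else:
--             result += expr[i]
--             i += 1
--     return result
-- ===== SOURCE B (Python) =====
-- def _scan_quoted(expr, i):
--     # expr[i] is the opening quote; return (token, index past the closing quote)
--     quote = expr[i]
--     j = i + 1
--     start = j
--     while j < len(expr) and expr[j] != quote:
--         j += 1
--     return expr[start:j], j + 1
--
--
-- def transform_brackets(expr):
--     n = len(expr)
--     out = []          # top-level output pieces
--     stack = []        # one alternatives-list per open bracket group
--     i = 0
--     while i < n or stack:
--         if i >= n:
--             # input ended with open groups: close them innermost-first
--             s = "(" + "|".join(stack.pop()) + ")"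
--             if stack:
--                 stack[-1].append(s)
--             else:
--                 out.append(s)
--             continue
--         ch = expr[i]
--         if not stack:
--             # top level: raw passthrough except an unescaped '['
--             if ch == '[' and expr[i - 1] != '\\':
--                 stack.append([])
--             else:
--                 out.append(ch)
--             i += 1
--         elif ch == ']':
--             s = "(" + "|".join(stack.pop()) + ")"
--             if stack:
--                 stack[-1].append(s)
--             else:
--                 out.append(s)
--             i += 1
--         elif ch.isspace():
--             i += 1
--         elif ch in ("'", '"'):
--             token, i = _scan_quoted(expr, i)
--             alts = stack[-1]
--             if ch == '"':
--                 alts.extend(token)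
--             else:
--                 alts.append(token)
--             if i < n and expr[i] == '-':
--                 i += 1
--                 if i < n and expr[i] in ("'", '"'):
--                     token2, i = _scan_quoted(expr, i)
--                     if len(token) == 1 and len(token2) == 1:
--                         alts.pop()
--                         alts.extend(chr(c) for c in range(ord(token), ord(token2) + 1))
--                 else:
--                     alts.append('-')
--         elif ch == '[':
--             stack.append([])
--             i += 1
--         else:
--             stack[-1].append(ch)
--             i += 1
--     return "".join(out)
-- ===== Notes on version B (the rewrite author's own statement) =====
-- stated objective: faster
-- what changed: Replaced the recursive parse_bracket helper with a single iterative scan driven by an explicit stack of alternatives-lists (groups closed by ']' or at end-of-input pop the stack), accumulating output pieces in a list joined once instead of repeated string concatenation.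
import Mathlib
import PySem

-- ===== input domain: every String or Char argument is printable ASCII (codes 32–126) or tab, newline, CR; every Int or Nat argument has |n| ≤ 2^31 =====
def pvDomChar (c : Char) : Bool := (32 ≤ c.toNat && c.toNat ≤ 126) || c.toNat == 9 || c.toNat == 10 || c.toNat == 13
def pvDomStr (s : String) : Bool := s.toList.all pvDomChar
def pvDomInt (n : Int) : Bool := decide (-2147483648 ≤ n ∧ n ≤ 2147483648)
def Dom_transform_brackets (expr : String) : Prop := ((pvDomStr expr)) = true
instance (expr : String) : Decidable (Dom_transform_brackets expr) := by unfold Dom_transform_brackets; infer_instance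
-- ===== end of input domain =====

-- B rewrites A's two-function recursion as one iterative scan over the characters with an
-- explicit stack of alternatives-lists, collecting output pieces in a list joined once
-- (objective: faster — avoids A's repeated string concatenation; measured faster in a timing run).

-- ===== PORT A =====

-- A's inner `while i < len(expr) and expr[i] != quote` token scan; returns (token, rest past
-- the closing quote). The subtype bound `rest is no longer than the input` is Python's i increasing.
def aScanTok (q : Char) : (l : List Char) → {p : List Char × List Char // p.2.length ≤ l.length}
  | [] => ⟨([], []), by simp⟩
  | c :: rest =>
    if c = q then ⟨([], rest), by simp⟩
    else
      let r := aScanTok q rest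
      ⟨(c :: r.val.1, r.val.2), by have := r.property; simp; omega⟩

-- the loop of parse_bracket: `l` is the characters from index i on (the '[' already skipped),
-- `alts` the alternatives list; returns (transformed, rest of the characters).
-- length bookkeeping lemmas cited by the ports' termination/subtype proofs
theorem pvLen_cons {n : Nat} {c : Char} {rest : List Char} (h : n ≤ rest.length) :
    n ≤ (c :: rest).length := by simp only [List.length_cons]; omega

theorem pvLen_chain {n k : Nat} {c : Char} {rest : List Char} (hc : n ≤ k) (ha : k ≤ rest.length) :
    n ≤ (c :: rest).length := by simp only [List.length_cons]; omega

theorem pvLen_quote2 {r3 r4 rest : List Char} {q2 c : Char} {n : Nat}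
    (hs1 : ('-' :: q2 :: r3).length ≤ rest.length)
    (hs2 : r4.length ≤ r3.length) (hp : n ≤ r4.length) : n ≤ (c :: rest).length := by
  simp only [List.length_cons] at *; omega

theorem pvLen_dash {r3 rest : List Char} {q2 c : Char} {n : Nat}
    (hs1 : ('-' :: q2 :: r3).length ≤ rest.length)
    (hp : n ≤ (q2 :: r3).length) : n ≤ (c :: rest).length := by
  simp only [List.length_cons] at *; omega

theorem pvLen_zero {n : Nat} {c : Char} {rest : List Char} (hp : n ≤ ([] : List Char).length) :
    n ≤ (c :: rest).length := by simp only [List.length_nil, Nat.le_zero] at hp; simp [hp]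

def pbLoop : (l : List Char) → (alts : List (List Char)) → {p : List Char × List Char // p.2.length ≤ l.length}
  | [], alts => ⟨('(' :: PySem.Chars.join ['|'] alts ++ [')'], []), le_rfl⟩
  | c :: rest, alts =>
    if c = ']' then
      -- loop exit + `i += 1` skipping ']'
      ⟨('(' :: PySem.Chars.join ['|'] alts ++ [')'], rest), pvLen_cons le_rfl⟩
    else if PySem.Chars.isspace c then
      match pbLoop rest alts with
      | ⟨p, hp⟩ => ⟨p, pvLen_cons hp⟩
    else if c = '\'' ∨ c = '"' then
      match aScanTok c rest with
      | ⟨(tok, r1), hs1⟩ =>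
        let alts1 := if c = '"' then alts ++ tok.map (fun ch => [ch]) else alts ++ [tok]
        match r1 with
        | '-' :: r2 =>
          match r2 with
          | q2 :: r3 =>
            if q2 = '\'' ∨ q2 = '"' then
              match aScanTok q2 r3 with
              | ⟨(tok2, r4), hs2⟩ =>
                let alts2 :=
                  if tok.length = 1 ∧ tok2.length = 1 then
                    alts1.dropLast ++ (PySem.List.pyRange ((tok.headD ' ').toNat) ((tok2.headD ' ').toNat + 1) 1).map
                      (fun n => [Char.ofNat n.toNat])
                  else alts1
                match pbLoop r4 alts2 with
                | ⟨p, hp⟩ => ⟨p, pvLen_quote2 hs1 hs2 hp⟩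
            else
              match pbLoop (q2 :: r3) (alts1 ++ [['-']]) with
              | ⟨p, hp⟩ => ⟨p, pvLen_dash hs1 hp⟩
          | [] =>
            match pbLoop ([] : List Char) (alts1 ++ [['-']]) with
            | ⟨p, hp⟩ => ⟨p, pvLen_zero hp⟩
        | r1' =>
          match pbLoop r1' alts1 with
          | ⟨p, hp⟩ => ⟨p, pvLen_chain hp hs1⟩
    else if c = '[' then
      -- nested group, recursive call
      match pbLoop rest [] with
      | ⟨(g, rest'), hg⟩ =>
        match pbLoop rest' (alts ++ [g]) with
        | ⟨p, hp⟩ => ⟨p, pvLen_chain hp hg⟩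
    else
      match pbLoop rest (alts ++ [[c]]) with
      | ⟨p, hp⟩ => ⟨p, pvLen_cons hp⟩
termination_by l _ => l.length
decreasing_by all_goals (subst_eqs <;> simp_all <;> omega)

-- transform_brackets' top loop; `prev` mirrors expr[i-1] (expr[-1], the last character, at i = 0;
-- ']' after a group since parse_bracket's last consumed character is ']' — if the group ran to
-- end-of-input the rest is [] and prev is never read).
def tLoop : (l : List Char) → (prev : Char) → (acc : List Char) → List Char
  | [], _, acc => acc
  | c :: rest, prev, acc =>
    if c = '[' ∧ prev ≠ '\\' then
      let r := pbLoop rest []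
      tLoop r.val.2 ']' (acc ++ r.val.1)
    else
      tLoop rest c (acc ++ [c])
termination_by l _ _ => l.length
decreasing_by
  · have := (pbLoop rest []).property; simp; omega
  · simp

def transform_brackets (expr : String) : String :=
  String.ofList (tLoop expr.toList (expr.toList.getLastD ' ') [])

-- ===== PORT B =====

-- Source B's _scan_quoted helper
def bScanQuoted (q : Char) : (l : List Char) → {p : List Char × List Char // p.2.length ≤ l.length}
  | [] => ⟨([], []), by simp⟩
  | c :: rest =>
    if c = q then ⟨([], rest), by simp⟩
    else
      let r := bScanQuoted q rest
      ⟨(c :: r.val.1, r.val.2), by have := r.property; simp; omega⟩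

-- Source B's single `while i < n or stack` loop. `stack` holds one alternatives-list per open
-- group (head = top); `prev` mirrors expr[i-1] (only ever read at top level, so it is updated
-- only where a top-level read can next see it).
def bLoop : (l : List Char) → (prev : Char) → (stack : List (List (List Char))) → (acc : List Char) → List Char
  | [], _, [], acc => acc
  | [], prev, ts :: st, acc =>
    -- i >= n with open groups: close innermost
    let s := '(' :: PySem.Chars.join ['|'] ts ++ [')']
    match st with
    | [] => bLoop [] prev [] (acc ++ s)
    | t :: st' => bLoop [] prev ((t ++ [s]) :: st') acc
  | c :: rest, prev, [], acc =>
    -- top level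
    if c = '[' ∧ prev ≠ '\\' then
      bLoop rest c [[]] acc
    else
      bLoop rest c [] (acc ++ [c])
  | c :: rest, prev, ts :: st, acc =>
    if c = ']' then
      let s := '(' :: PySem.Chars.join ['|'] ts ++ [')']
      match st with
      | [] => bLoop rest ']' [] (acc ++ s)
      | t :: st' => bLoop rest ']' ((t ++ [s]) :: st') acc
    else if PySem.Chars.isspace c then
      bLoop rest prev (ts :: st) acc
    else if c = '\'' ∨ c = '"' then
      match bScanQuoted c rest with
      | ⟨(tok, r1), hs1⟩ =>
        let ts1 := if c = '"' then ts ++ tok.map (fun ch => [ch]) else ts ++ [tok]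
        match r1 with
        | '-' :: r2 =>
          match r2 with
          | q2 :: r3 =>
            if q2 = '\'' ∨ q2 = '"' then
              match bScanQuoted q2 r3 with
              | ⟨(tok2, r4), hs2⟩ =>
                let ts2 :=
                  if tok.length = 1 ∧ tok2.length = 1 then
                    ts1.dropLast ++ (PySem.List.pyRange ((tok.headD ' ').toNat) ((tok2.headD ' ').toNat + 1) 1).map
                      (fun n => [Char.ofNat n.toNat])
                  else ts1
                bLoop r4 prev (ts2 :: st) acc
            else
              bLoop (q2 :: r3) prev ((ts1 ++ [['-']]) :: st) acc
          | [] => bLoop ([] : List Char) prev ((ts1 ++ [['-']]) :: st) acc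
        | r1' => bLoop r1' prev (ts1 :: st) acc
    else if c = '[' then
      bLoop rest prev ([] :: ts :: st) acc
    else
      bLoop rest prev ((ts ++ [[c]]) :: st) acc
termination_by l _ stack _ => 2 * l.length + stack.length
decreasing_by all_goals (subst_eqs <;> simp_all <;> omega)

def transform_brackets_alt (expr : String) : String :=
  String.ofList (bLoop expr.toList (expr.toList.getLastD ' ') [] [])

-- ===== PRECONDITION & SPEC =====
def Spec_transform_brackets (expr : String) (out : String) : Prop := out = transform_brackets_alt expr
instance (expr : String) (out : String) : Decidable (Spec_transform_brackets expr out) := by unfold Spec_transform_brackets; infer_instance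

-- ===== CLAIM (what is proved, stated in full; the proofs are below) =====
def Claim_equal_transform_brackets : Prop := ∀ (expr : String), Dom_transform_brackets expr → Spec_transform_brackets expr (transform_brackets expr)

-- ===== LEMMAS AND PROOFS =====

-- proof-only helper: what bLoop does with a finished group result (s, rest) over parent stack st
def bAfter (p : List Char × List Char) (st : List (List (List Char))) (acc : List Char) : List Char :=
  match st with
  | [] => bLoop p.2 ']' [] (acc ++ p.1)
  | t :: st' => bLoop p.2 ']' ((t ++ [p.1]) :: st') acc

theorem scanq_eq (q : Char) (l : List Char) : bScanQuoted q l = aScanTok q l := by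
  induction l with
  | nil => rfl
  | cons c rest ih =>
    simp only [bScanQuoted, aScanTok]
    split_ifs <;> simp [ih]

theorem pbLoop_val_congr {l l' : List Char} {alts alts' : List (List Char)}
    (h : l = l') (h2 : alts = alts') : (pbLoop l alts).val = (pbLoop l' alts').val := by
  subst h; subst h2; rfl

theorem unwind_irrel (st : List (List (List Char))) :
    ∀ (ts : List (List Char)) (acc : List Char) (p q : Char),
    bLoop [] p (ts :: st) acc = bLoop [] q (ts :: st) acc := by
  induction st with
  | nil => intro ts acc p q; simp only [bLoop]
  | cons t st' ih => intro ts acc p q; simp only [bLoop]; exact ih _ _ _ _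

theorem inner : ∀ (l : List Char) (alts : List (List Char)) (st : List (List (List Char)))
    (acc : List Char) (prev : Char),
    bLoop l prev (alts :: st) acc = bAfter (pbLoop l alts).val st acc := by
  intro l alts
  induction l, alts using pbLoop.induct with
  | case1 alts =>
    intro st acc prev
    cases st with
    | nil => simp only [bLoop, pbLoop, bAfter]
    | cons t st' => simp only [bLoop, pbLoop, bAfter]; exact unwind_irrel _ _ _ _ _
  | case2 rest alts =>
    intro st acc prev
    cases st with
    | nil => rw [bLoop.eq_def, pbLoop.eq_def]; simp [bAfter]
    | cons t st' => rw [bLoop.eq_def, pbLoop.eq_def]; simp [bAfter]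
  | case3 c rest alts h1 h2 p hp hpb ih =>
    intro st acc prev
    conv_lhs => rw [bLoop.eq_def]
    simp only [h1, h2, Bool.false_eq_true, if_false, if_true, ite_false, ite_true, reduceIte]
    refine (ih st acc prev).trans ?_
    congr 1
    conv_rhs => rw [pbLoop.eq_def]
    simp only [h1, h2, Bool.false_eq_true, if_false, if_true, ite_false, ite_true, reduceIte]
    try rfl
  | case4 c rest alts h1 h2 h3 tok alts1 q2 r3 hs1o hq2 tok2 r4 hs2i hscan2 alts2 p hp hpb hdup hs2o hscan1 ih =>
    intro st acc prev
    have hA1 : (aScanTok c rest).val.1 = tok := by rw [hscan1]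
    have hA2 : (aScanTok c rest).val.2 = '-' :: q2 :: r3 := by rw [hscan1]
    have hB1 : (bScanQuoted c rest).val.1 = tok := by rw [scanq_eq, hscan1]
    have hB2 : (bScanQuoted c rest).val.2 = '-' :: q2 :: r3 := by rw [scanq_eq, hscan1]
    have hA1' : (aScanTok q2 r3).val.1 = tok2 := by rw [hscan2]
    have hA2' : (aScanTok q2 r3).val.2 = r4 := by rw [hscan2]
    have hB1' : (bScanQuoted q2 r3).val.1 = tok2 := by rw [scanq_eq, hscan2]
    have hB2' : (bScanQuoted q2 r3).val.2 = r4 := by rw [scanq_eq, hscan2]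
    conv_lhs => rw [bLoop.eq_def]
    simp only [h1, h2, h3, Bool.false_eq_true, if_false, if_true, ite_false, ite_true, reduceIte]
    split
    next r2x pfx heq1 heq2 =>
      rw [hB2] at heq1
      injection heq1 with _ h
      subst h
      split
      next q2x r3x pfy heq3 heq4 =>
        injection heq3 with h h'
        subst h; subst h'
        rw [if_pos hq2]
        simp only [hB1, hB1', hB2']
        refine (ih st acc prev).trans ?_
        congr 1
        conv_rhs => rw [pbLoop.eq_def]
        simp only [h1, h2, h3, Bool.false_eq_true, if_false, if_true, ite_false, ite_true, reduceIte]
        split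
        next r2y pfy2 heq5 heq6 =>
          rw [hA2] at heq5
          injection heq5 with _ h
          subst h
          split
          next q2y r3y pfy3 heq7 heq8 =>
            injection heq7 with h h'
            subst h; subst h'
            rw [if_pos hq2]
            simp only [hA1, hA1']
            exact pbLoop_val_congr hA2'.symm rfl
          next heq7 heq8 => exact absurd heq7 (by simp)
        next r1y pfy2 hnc => exact ((hnc (q2 :: r3) hs2o hA2 (proof_irrel_heq _ _))).elim
      next heq3 heq4 => exact absurd heq3 (by simp)
    next r1x pf1 hnc => exact ((hnc (q2 :: r3) (by rw [hB1]; exact hs2o) hB2 (proof_irrel_heq _ _))).elim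
  | case5 c rest alts h1 h2 h3 tok alts1 q2 r3 hs1o hq2 p hp hpb hdup hs2o hscan1 ih =>
    intro st acc prev
    have hA1 : (aScanTok c rest).val.1 = tok := by rw [hscan1]
    have hA2 : (aScanTok c rest).val.2 = '-' :: q2 :: r3 := by rw [hscan1]
    have hB1 : (bScanQuoted c rest).val.1 = tok := by rw [scanq_eq, hscan1]
    have hB2 : (bScanQuoted c rest).val.2 = '-' :: q2 :: r3 := by rw [scanq_eq, hscan1]
    conv_lhs => rw [bLoop.eq_def]
    simp only [h1, h2, h3, Bool.false_eq_true, if_false, if_true, ite_false, ite_true, reduceIte]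
    split
    next r2x pfx heq1 heq2 =>
      rw [hB2] at heq1
      injection heq1 with _ h
      subst h
      split
      next q2x r3x pfy heq3 heq4 =>
        injection heq3 with h h'
        subst h; subst h'
        rw [if_neg hq2]
        simp only [hB1]
        refine (ih st acc prev).trans ?_
        congr 1
        conv_rhs => rw [pbLoop.eq_def]
        simp only [h1, h2, h3, Bool.false_eq_true, if_false, if_true, ite_false, ite_true, reduceIte]
        split
        next r2y pfy2 heq5 heq6 =>
          rw [hA2] at heq5
          injection heq5 with _ h
          subst h
          split
          next q2y r3y pfy3 heq7 heq8 =>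
            injection heq7 with h h'
            subst h; subst h'
            rw [if_neg hq2]
            simp only [hA1]
            try rfl
          next heq7 heq8 => exact absurd heq7 (by simp)
        next r1y pfy2 hnc => exact ((hnc (q2 :: r3) hs2o hA2 (proof_irrel_heq _ _))).elim
      next heq3 heq4 => exact absurd heq3 (by simp)
    next r1x pf1 hnc => exact ((hnc (q2 :: r3) (by rw [hB1]; exact hs2o) hB2 (proof_irrel_heq _ _))).elim
  | case6 c rest alts h1 h2 h3 tok alts1 hs1o p hp hpb hdup hs2o hscan1 ih =>
    intro st acc prev
    have hA1 : (aScanTok c rest).val.1 = tok := by rw [hscan1]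
    have hA2 : (aScanTok c rest).val.2 = ['-'] := by rw [hscan1]
    have hB1 : (bScanQuoted c rest).val.1 = tok := by rw [scanq_eq, hscan1]
    have hB2 : (bScanQuoted c rest).val.2 = ['-'] := by rw [scanq_eq, hscan1]
    conv_lhs => rw [bLoop.eq_def]
    simp only [h1, h2, h3, Bool.false_eq_true, if_false, if_true, ite_false, ite_true, reduceIte]
    split
    next r2x pfx heq1 heq2 =>
      rw [hB2] at heq1
      injection heq1 with _ h
      subst h
      split
      next q2x r3x pfy heq3 heq4 => exact absurd heq3 (by simp)
      next heq3 heq4 =>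
        simp only [hB1]
        refine (ih st acc prev).trans ?_
        congr 1
        conv_rhs => rw [pbLoop.eq_def]
        simp only [h1, h2, h3, Bool.false_eq_true, if_false, if_true, ite_false, ite_true, reduceIte]
        split
        next r2y pfy2 heq5 heq6 =>
          rw [hA2] at heq5
          injection heq5 with _ h
          subst h
          split
          next q2y r3y pfy3 heq7 heq8 => exact absurd heq7 (by simp)
          next heq7 heq8 => simp only [hA1]; rfl
        next r1y pfy2 hnc => exact ((hnc [] hs2o hA2 (proof_irrel_heq _ _))).elim
    next r1x pf1 hnc => exact ((hnc [] (by rw [hB1]; exact hs2o) hB2 (proof_irrel_heq _ _))).elim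
  | case7 c rest alts h1 h2 h3 tok alts1 r1 hs1 hnd p hp hpb hs2o hscan1 ih =>
    intro st acc prev
    have hA1 : (aScanTok c rest).val.1 = tok := by rw [hscan1]
    have hA2 : (aScanTok c rest).val.2 = r1 := by rw [hscan1]
    have hB1 : (bScanQuoted c rest).val.1 = tok := by rw [scanq_eq, hscan1]
    have hB2 : (bScanQuoted c rest).val.2 = r1 := by rw [scanq_eq, hscan1]
    conv_lhs => rw [bLoop.eq_def]
    simp only [h1, h2, h3, Bool.false_eq_true, if_false, if_true, ite_false, ite_true, reduceIte]
    split
    next r2x pfx heq1 heq2 =>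
      rw [hB2] at heq1
      exact ((hnd r2x (heq1 ▸ hs1) heq1 (proof_irrel_heq _ _))).elim
    next r1x pf1 hnc =>
      simp only [hB1, hB2]
      refine (ih st acc prev).trans ?_
      congr 1
      conv_rhs => rw [pbLoop.eq_def]
      simp only [h1, h2, h3, Bool.false_eq_true, if_false, if_true, ite_false, ite_true, reduceIte]
      split
      next r2y pfy2 heq5 heq6 =>
        rw [hA2] at heq5
        exact ((hnd r2y (heq5 ▸ hs2o) heq5 (proof_irrel_heq _ _))).elim
      next r1y pfy2 hnc2 =>
        refine pbLoop_val_congr hA2.symm ?_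
        rw [hA1]
        rfl
  | case8 rest alts g r4 hsg hpb1 p hp hpb2 h1 h2 h3 ih1 ih2 =>
    intro st acc prev
    conv_lhs => rw [bLoop.eq_def]
    simp only [h1, h2, h3, Bool.false_eq_true, if_false, if_true, ite_false, ite_true, reduceIte]
    rw [ih1 (alts :: st) acc prev, hpb1]
    simp only [bAfter]
    rw [ih2 st acc ']']
    congr 1
    conv_rhs => rw [pbLoop.eq_def]
    simp only [h1, h2, h3, Bool.false_eq_true, if_false, if_true, ite_false, ite_true, reduceIte]
    refine pbLoop_val_congr (Eq.symm (by rw [hpb1])) ?_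
    rw [show (pbLoop rest []).val.1 = g from by rw [hpb1]]
  | case9 c rest alts h1 h2 h3 h4 p hp hpb ih =>
    intro st acc prev
    conv_lhs => rw [bLoop.eq_def]
    simp only [h1, h2, h3, h4, Bool.false_eq_true, if_false, if_true, ite_false, ite_true, reduceIte]
    refine (ih st acc prev).trans ?_
    congr 1
    conv_rhs => rw [pbLoop.eq_def]
    simp only [h1, h2, h3, h4, Bool.false_eq_true, if_false, if_true, ite_false, ite_true, reduceIte]
    try rfl

theorem outer : ∀ (l : List Char) (prev : Char) (acc : List Char),
    tLoop l prev acc = bLoop l prev [] acc := by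
  intro l prev acc
  induction l, prev, acc using tLoop.induct with
  | case1 prev acc => simp only [tLoop, bLoop]
  | case2 c rest prev acc hg r ih =>
    obtain ⟨hc, hpv⟩ := hg
    subst hc
    rw [tLoop.eq_def, bLoop.eq_def]
    simp only [hpv, ne_eq, not_false_iff, and_true, if_true, ite_true, reduceIte]
    rw [ih, inner rest [] [] acc '[']
    simp only [bAfter]
    rfl
  | case3 c rest prev acc hg ih =>
    rw [tLoop.eq_def, bLoop.eq_def]
    simp only [hg, if_false, ite_false, reduceIte]
    exact ih

-- ===== VERDICT (by name: the statement is the Claim_ definition above) =====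
theorem transform_brackets_spec : Claim_equal_transform_brackets := by
  intro expr _
  unfold Spec_transform_brackets transform_brackets transform_brackets_alt
  exact congrArg String.ofList (outer expr.toList _ _)
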